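-- pv_equiv track=rewrite | github.com/EugeneDlg/BnCgame | nonrecur_bnc.py | overlap_set_items
-- ===== SOURCE A (Python) =====
-- def overlap_set_items(a0, a1):
--     lst = []
--     for x in zip(a0, a1):
--         if x[0].isnumeric() and x[1].isnumeric():
--             return None
--         lst.append(x[0] if x[0].isnumeric() else x[1])
--     digits = list(filter(lambda e: e.isnumeric(), lst))
--     if len(digits) != len(set(digits)):
--         return None
--     else:
--         return tuple(lst)
-- ===== SOURCE B (Python) =====
-- def overlap_set_items(a0, a1):
--     # right-to-left scan: duplicates among numeric picks are detected online
--     # with a running set (early exit), instead of a post-hoc filter + set-size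
--     # comparison; the merged list is built backwards and reversed at the end.
--     seen = set()
--     rev = []
--     for x0, x1 in reversed(list(zip(a0, a1))):
--         if x0.isnumeric() and x1.isnumeric():
--             return None
--         p = x0 if x0.isnumeric() else x1
--         if p.isnumeric():
--             if p in seen:
--                 return None
--             seen.add(p)
--         rev.append(p)
--     rev.reverse()
--     return tuple(rev)
-- ===== Notes on version B (the rewrite author's own statement) =====
-- stated objective: alternative
-- what changed: A scans left-to-right, appends picks, then checks digit duplicates post-hoc by filtering and comparing the filtered list's length with its set's size; B scans the pairs right-to-left, detects a duplicate numeric pick online with a running seen-set (exiting early), builds the merged list backwards and reverses it at the end (correct because both None-conditions -- some both-numeric pair, some repeated numeric pick -- are order-independent).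
import Mathlib
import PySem

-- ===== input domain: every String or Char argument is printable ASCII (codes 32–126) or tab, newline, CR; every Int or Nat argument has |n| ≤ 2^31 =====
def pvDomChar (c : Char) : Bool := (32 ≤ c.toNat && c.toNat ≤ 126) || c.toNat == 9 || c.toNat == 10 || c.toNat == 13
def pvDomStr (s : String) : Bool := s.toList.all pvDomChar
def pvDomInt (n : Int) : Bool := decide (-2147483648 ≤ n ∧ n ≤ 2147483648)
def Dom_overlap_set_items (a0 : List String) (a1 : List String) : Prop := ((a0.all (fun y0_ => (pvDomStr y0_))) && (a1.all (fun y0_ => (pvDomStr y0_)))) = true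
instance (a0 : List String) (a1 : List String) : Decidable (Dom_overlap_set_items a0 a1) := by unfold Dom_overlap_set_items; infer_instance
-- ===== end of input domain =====

-- B scans the zipped pairs right-to-left with an online seen-set (early exit on a
-- repeated numeric pick) instead of A's left-to-right build followed by a post-hoc
-- filter + set-size duplicate check; objective: alternative.
-- s.isnumeric() is ported as PySem.Str.strIsdigit, exact on the ASCII domain.

-- ===== PORT A =====
-- A's for-loop: early-returns none on a both-numeric pair, else appends the pick to lst
def pvLoopA : List (String × String) → List String → Option (List String)
  | [], lst => some lst
  | x :: rest, lst =>
    if PySem.Str.strIsdigit x.1 && PySem.Str.strIsdigit x.2 then none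
    else pvLoopA rest (lst ++ [if PySem.Str.strIsdigit x.1 then x.1 else x.2])

def overlap_set_items (a0 : List String) (a1 : List String) : Option (List String) :=
  match pvLoopA (a0.zip a1) [] with
  | none => none
  | some lst =>
    let digits := lst.filter (fun e => PySem.Str.strIsdigit e)
    if digits.length ≠ (PySem.Set.ofList digits).length then none
    else some lst

-- ===== PORT B =====
-- B's for-loop over the reversed pairs: seen = numeric picks so far, rev = backwards result
def pvLoopB : List (String × String) → PySem.Set String → List String → Option (List String)
  | [], _, rev => some rev
  | (x0, x1) :: rest, seen, rev =>
    if PySem.Str.strIsdigit x0 && PySem.Str.strIsdigit x1 then none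
    else
      let p := if PySem.Str.strIsdigit x0 then x0 else x1
      if PySem.Str.strIsdigit p then
        if PySem.Set.contains seen p then none
        else pvLoopB rest (PySem.Set.add seen p) (rev ++ [p])
      else pvLoopB rest seen (rev ++ [p])

def overlap_set_items_alt (a0 : List String) (a1 : List String) : Option (List String) :=
  match pvLoopB ((a0.zip a1).reverse) PySem.Set.empty [] with
  | none => none
  | some rev => some rev.reverse

-- ===== PRECONDITION & SPEC =====
def Spec_overlap_set_items (a0 : List String) (a1 : List String) (out : Option (List String)) : Prop := out = overlap_set_items_alt a0 a1
instance (a0 : List String) (a1 : List String) (out : Option (List String)) : Decidable (Spec_overlap_set_items a0 a1 out) := by unfold Spec_overlap_set_items; infer_instance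

-- ===== CLAIM (what is proved, stated in full; the proofs are below) =====
def Claim_equal_overlap_set_items : Prop := ∀ (a0 : List String) (a1 : List String), Dom_overlap_set_items a0 a1 → Spec_overlap_set_items a0 a1 (overlap_set_items a0 a1)

-- ===== LEMMAS AND PROOFS =====

-- the online duplicate check B performs on the numeric picks, as a standalone scan
def pvChk : List String → PySem.Set String → Bool
  | [], _ => true
  | d :: ds, s => if PySem.Set.contains s d then false else pvChk ds (PySem.Set.add s d)

theorem pvChk_iff (ds : List String) (s : PySem.Set String) :
    pvChk ds s = true ↔ ds.Nodup ∧ ∀ d ∈ ds, d ∉ s := by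
  induction ds generalizing s with
  | nil => simp [pvChk]
  | cons d ds ih =>
    show (if PySem.Set.contains s d = true then false else pvChk ds (PySem.Set.add s d)) = true ↔ _
    by_cases hd : d ∈ s
    · rw [if_pos ((PySem.Set.contains_iff s d).mpr hd)]
      simp only [Bool.false_eq_true, false_iff]
      rintro ⟨-, hall⟩
      exact hall d (List.mem_cons_self ..) hd
    · rw [if_neg (fun hc => hd ((PySem.Set.contains_iff s d).mp hc)), ih]
      constructor
      · rintro ⟨hn, hall⟩
        have hdds : d ∉ ds := fun hm => hall d hm ((PySem.Set.mem_add s d d).mpr (Or.inr rfl))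
        refine ⟨List.nodup_cons.mpr ⟨hdds, hn⟩, ?_⟩
        intro e he
        rcases List.mem_cons.mp he with rfl | he'
        · exact hd
        · exact fun hes => hall e he' ((PySem.Set.mem_add s d e).mpr (Or.inl hes))
      · rintro ⟨hn, hall⟩
        rcases List.nodup_cons.mp hn with ⟨hdds, hn'⟩
        refine ⟨hn', fun e he hes => ?_⟩
        rcases (PySem.Set.mem_add s d e).mp hes with h1 | rfl
        · exact hall e (List.mem_cons_of_mem _ he) h1
        · exact hdds he

theorem nodup_iff_ofList_length (ds : List String) :
    (PySem.Set.ofList ds).length = ds.length ↔ ds.Nodup := by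
  have hperm : (PySem.Set.ofList ds).Perm ds.dedup := by
    rw [List.perm_ext_iff_of_nodup (PySem.Set.nodup_ofList ds) ds.nodup_dedup]
    intro x; rw [PySem.Set.mem_ofList, List.mem_dedup]
  rw [hperm.length_eq]
  constructor
  · intro h
    rw [← List.dedup_eq_self]
    exact (ds.dedup_sublist).eq_of_length h
  · intro h; rw [List.dedup_eq_self.mpr h]

-- A's loop computed in closed form: any both-numeric pair → none, else the picks
theorem pvLoopA_eq (ps : List (String × String)) (acc : List String) :
    pvLoopA ps acc =
      if ps.any (fun x => PySem.Str.strIsdigit x.1 && PySem.Str.strIsdigit x.2) then none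
      else some (acc ++ ps.map (fun x => if PySem.Str.strIsdigit x.1 then x.1 else x.2)) := by
  induction ps generalizing acc with
  | nil => simp [pvLoopA]
  | cons x rest ih =>
    show (if PySem.Str.strIsdigit x.1 && PySem.Str.strIsdigit x.2 then none
          else pvLoopA rest (acc ++ [if PySem.Str.strIsdigit x.1 then x.1 else x.2])) = _
    rw [List.any_cons, List.map_cons]
    by_cases h : (PySem.Str.strIsdigit x.1 && PySem.Str.strIsdigit x.2) = true
    · rw [if_pos h, h, Bool.true_or, if_pos rfl]
    · have h' : (PySem.Str.strIsdigit x.1 && PySem.Str.strIsdigit x.2) = false :=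
        Bool.eq_false_iff.mpr h
      rw [if_neg h, ih, h', Bool.false_or, List.append_assoc, List.singleton_append]

-- B's loop computed in closed form: any both-numeric pair → none, else pvChk over
-- the numeric picks decides none vs the picks appended to the accumulator
theorem pvLoopB_eq (ps : List (String × String)) (seen : PySem.Set String) (rev : List String) :
    pvLoopB ps seen rev =
      if ps.any (fun x => PySem.Str.strIsdigit x.1 && PySem.Str.strIsdigit x.2) then none
      else if pvChk ((ps.map (fun x => if PySem.Str.strIsdigit x.1 then x.1 else x.2)).filter
                      (fun e => PySem.Str.strIsdigit e)) seen then
        some (rev ++ ps.map (fun x => if PySem.Str.strIsdigit x.1 then x.1 else x.2))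
      else none := by
  induction ps generalizing seen rev with
  | nil => simp [pvLoopB, pvChk]
  | cons x rest ih =>
    obtain ⟨x0, x1⟩ := x
    simp only [pvLoopB, List.any_cons, List.map_cons, List.filter_cons]
    by_cases h : (PySem.Str.strIsdigit x0 && PySem.Str.strIsdigit x1) = true
    · rw [if_pos h, h, Bool.true_or, if_pos rfl]
    · have h' : (PySem.Str.strIsdigit x0 && PySem.Str.strIsdigit x1) = false :=
        Bool.eq_false_iff.mpr h
      rw [if_neg h, h', Bool.false_or]
      by_cases hnum : PySem.Str.strIsdigit (if PySem.Str.strIsdigit x0 then x0 else x1) = true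
      · rw [if_pos hnum, if_pos hnum]
        by_cases hin :
            PySem.Set.contains seen (if PySem.Str.strIsdigit x0 then x0 else x1) = true
        · rw [if_pos hin]
          simp only [pvChk, hin, if_true, if_neg Bool.false_ne_true, ite_self]
        · have hin' := Bool.eq_false_iff.mpr hin
          rw [if_neg hin, ih]
          simp only [pvChk, hin', if_neg Bool.false_ne_true]
          rw [List.append_assoc, List.singleton_append]
      · rw [if_neg hnum, if_neg hnum, ih, List.append_assoc, List.singleton_append]

-- A in closed form
theorem portA_closed (a0 a1 : List String) :
    overlap_set_items a0 a1 =
      if (a0.zip a1).any (fun x => PySem.Str.strIsdigit x.1 && PySem.Str.strIsdigit x.2) then none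
      else
        let picks := (a0.zip a1).map (fun x => if PySem.Str.strIsdigit x.1 then x.1 else x.2)
        let digits := picks.filter (fun e => PySem.Str.strIsdigit e)
        if digits.length ≠ (PySem.Set.ofList digits).length then none else some picks := by
  unfold overlap_set_items
  rw [pvLoopA_eq]
  by_cases h : ((a0.zip a1).any (fun x => PySem.Str.strIsdigit x.1 && PySem.Str.strIsdigit x.2)) = true
  · rw [if_pos h, if_pos h]
  · rw [if_neg h, if_neg h]
    simp only [List.nil_append]

-- B in closed form: the online duplicate scan reduced to a Nodup test
theorem portB_closed (a0 a1 : List String) :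
    overlap_set_items_alt a0 a1 =
      if (a0.zip a1).any (fun x => PySem.Str.strIsdigit x.1 && PySem.Str.strIsdigit x.2) then none
      else
        let picks := (a0.zip a1).map (fun x => if PySem.Str.strIsdigit x.1 then x.1 else x.2)
        let digits := picks.filter (fun e => PySem.Str.strIsdigit e)
        if digits.Nodup then some picks else none := by
  unfold overlap_set_items_alt
  rw [pvLoopB_eq, List.any_reverse, List.map_reverse, List.filter_reverse]
  by_cases h : ((a0.zip a1).any (fun x => PySem.Str.strIsdigit x.1 && PySem.Str.strIsdigit x.2)) = true
  · rw [if_pos h, if_pos h]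
  · rw [if_neg h, if_neg h]
    have hchk : pvChk ((((a0.zip a1).map (fun x => if PySem.Str.strIsdigit x.1 then x.1 else x.2)).filter
        (fun e => PySem.Str.strIsdigit e)).reverse) PySem.Set.empty = true ↔
        (((a0.zip a1).map (fun x => if PySem.Str.strIsdigit x.1 then x.1 else x.2)).filter
        (fun e => PySem.Str.strIsdigit e)).Nodup := by
      rw [pvChk_iff, List.nodup_reverse]
      simp [PySem.Set.empty]
    by_cases hn : (((a0.zip a1).map (fun x => if PySem.Str.strIsdigit x.1 then x.1 else x.2)).filter
        (fun e => PySem.Str.strIsdigit e)).Nodup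
    · rw [if_pos (hchk.mpr hn), if_pos hn]
      simp
    · rw [if_neg (fun hc => hn (hchk.mp hc)), if_neg hn]

-- ===== VERDICT (by name: the statement is the Claim_ definition above) =====
theorem overlap_set_items_spec : Claim_equal_overlap_set_items := by
  intro a0 a1 _
  unfold Spec_overlap_set_items
  rw [portA_closed, portB_closed]
  by_cases h : ((a0.zip a1).any (fun x => PySem.Str.strIsdigit x.1 && PySem.Str.strIsdigit x.2)) = true
  · rw [if_pos h, if_pos h]
  · rw [if_neg h, if_neg h]
    by_cases hn : (((a0.zip a1).map (fun x => if PySem.Str.strIsdigit x.1 then x.1 else x.2)).filter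
        (fun e => PySem.Str.strIsdigit e)).Nodup
    · have h1 : ¬ (((a0.zip a1).map (fun x => if PySem.Str.strIsdigit x.1 then x.1 else x.2)).filter
          (fun e => PySem.Str.strIsdigit e)).length ≠
          (PySem.Set.ofList (((a0.zip a1).map (fun x => if PySem.Str.strIsdigit x.1 then x.1 else x.2)).filter
          (fun e => PySem.Str.strIsdigit e))).length := by
        rw [(nodup_iff_ofList_length _).mpr hn]
        omega
      simp only [if_neg h1, if_pos hn]
    · have h1 : (((a0.zip a1).map (fun x => if PySem.Str.strIsdigit x.1 then x.1 else x.2)).filter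
          (fun e => PySem.Str.strIsdigit e)).length ≠
          (PySem.Set.ofList (((a0.zip a1).map (fun x => if PySem.Str.strIsdigit x.1 then x.1 else x.2)).filter
          (fun e => PySem.Str.strIsdigit e))).length := by
        intro hlen
        exact hn ((nodup_iff_ofList_length _).mp hlen.symm)
      simp only [if_pos h1, if_neg hn]
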